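-- pv_equiv track=rewrite | github.com/cleber-si/ExoImage | Download Mission Data/K2/generate_k2_download_scripts.py | split_dictionary_into_num_files
-- ===== SOURCE A (Python) =====
-- def split_dictionary_into_num_files(dic, num_files):
--     # Calculate the size of each sub-dictionary.
--     size = len(dic) // num_files
--     remainder = len(dic) % num_files
--
--     # Initialize the three new dictionaries.
--     dict1, dict2, dict3 = {}, {}, {}
--
--     # Create a list of items from the original dictionary.
--     items = list(dic.items())
--
--     # Distribute items into the new dictionaries.
--     for i, (key, value) in enumerate(items):
--         if i < size + (1 if remainder > 0 else 0):
--             dict1[key] = value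
--         elif i < 2 * size + (1 if remainder > 1 else 0):
--             dict2[key] = value
--         else:
--             dict3[key] = value
--
--     return [dict1, dict2, dict3]
-- ===== SOURCE B (Python) =====
-- def _consume(it, k):
--     # Take up to k items from the shared iterator into a fresh dict.
--     d = {}
--     for _, (key, value) in zip(range(k), it):
--         d[key] = value
--     return d
--
--
-- def split_dictionary_into_num_files(dic, num_files):
--     size, remainder = divmod(len(dic), num_files)
--     cut1 = size + (1 if remainder > 0 else 0)
--     cut2 = 2 * size + (1 if remainder > 1 else 0)
--     it = iter(dic.items())
--     first = _consume(it, cut1)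
--     second = _consume(it, cut2 - cut1)
--     return [first, second, dict(it)]
-- ===== Notes on version B (the rewrite author's own statement) =====
-- stated objective: alternative
-- what changed: Replaces A's indexed loop that compares every item's position against two boundaries with a shared consuming iterator: two staged prefix-consumptions of computed chunk lengths build the first two dicts and dict(it) collects the tail, so no item list, indices or per-item comparisons exist.
import Mathlib
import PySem

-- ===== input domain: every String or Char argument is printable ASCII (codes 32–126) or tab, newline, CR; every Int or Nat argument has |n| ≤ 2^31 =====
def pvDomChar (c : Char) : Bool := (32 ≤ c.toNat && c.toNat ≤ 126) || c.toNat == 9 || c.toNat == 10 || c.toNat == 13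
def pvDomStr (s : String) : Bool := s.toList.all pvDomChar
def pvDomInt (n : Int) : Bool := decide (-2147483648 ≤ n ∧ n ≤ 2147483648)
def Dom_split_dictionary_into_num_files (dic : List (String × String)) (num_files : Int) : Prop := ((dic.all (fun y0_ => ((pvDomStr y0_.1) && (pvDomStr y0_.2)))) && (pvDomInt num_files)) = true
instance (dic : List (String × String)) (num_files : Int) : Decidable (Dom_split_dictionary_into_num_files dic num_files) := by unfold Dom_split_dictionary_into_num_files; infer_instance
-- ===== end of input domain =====

-- B replaces A's indexed branching loop with a shared consuming iterator: two staged prefix-consumptions and the tail (alternative decomposition, same results).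


-- ===== PORT A =====
-- A's loop body: place item p into dict1/dict2/dict3 according to its index p.1.
def pvStepA (size remainder : Int)
    (s : PySem.Dict String String × PySem.Dict String String × PySem.Dict String String)
    (p : Int × (String × String)) :
    PySem.Dict String String × PySem.Dict String String × PySem.Dict String String :=
  if p.1 < size + (if remainder > 0 then 1 else 0) then
    (s.1.insert p.2.1 p.2.2, s.2.1, s.2.2)
  else if p.1 < 2 * size + (if remainder > 1 then 1 else 0) then
    (s.1, s.2.1.insert p.2.1 p.2.2, s.2.2)
  else
    (s.1, s.2.1, s.2.2.insert p.2.1 p.2.2)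

def split_dictionary_into_num_files (dic : List (String × String)) (num_files : Int) : List (List (String × String)) :=
  let size := PySem.Int.floordiv dic.length num_files
  let remainder := PySem.Int.mod dic.length num_files
  let s := (PySem.List.enumerate dic 0).foldl (pvStepA size remainder)
    (PySem.Dict.empty, PySem.Dict.empty, PySem.Dict.empty)
  [s.1.items, s.2.1.items, s.2.2.items]

-- ===== PORT B =====
-- B's helper _consume: pop up to k items off the iterator (= remaining list) into a fresh dict;
-- returns the dict together with the not-yet-consumed rest of the iterator.
def pvConsume (k : Int) (l : List (String × String)) (d : PySem.Dict String String) :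
    PySem.Dict String String × List (String × String) :=
  if k ≤ 0 then (d, l)
  else match l with
    | [] => (d, [])
    | p :: rest => pvConsume (k - 1) rest (d.insert p.1 p.2)

def split_dictionary_into_num_files_alt (dic : List (String × String)) (num_files : Int) : List (List (String × String)) :=
  let size := PySem.Int.floordiv dic.length num_files
  let remainder := PySem.Int.mod dic.length num_files
  let cut1 := size + (if remainder > 0 then 1 else 0)
  let cut2 := 2 * size + (if remainder > 1 then 1 else 0)
  let r1 := pvConsume cut1 dic PySem.Dict.empty
  let r2 := pvConsume (cut2 - cut1) r1.2 PySem.Dict.empty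
  [r1.1.items, r2.1.items, (PySem.Dict.ofList r2.2).items]

-- ===== PRECONDITION & SPEC =====
-- Pre_ excludes only num_files = 0, on which Python's '//' raises ZeroDivisionError in both A and B.
def Pre_split_dictionary_into_num_files (dic : List (String × String)) (num_files : Int) : Prop :=
  num_files ≠ 0
instance (dic : List (String × String)) (num_files : Int) : Decidable (Pre_split_dictionary_into_num_files dic num_files) := by unfold Pre_split_dictionary_into_num_files; infer_instance
def pvWitness_split_dictionary_into_num_files : (List (String × String)) × Int :=
  ([("a", "1"), ("b", "2"), ("c", "3"), ("d", "4")], 3)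
def Spec_split_dictionary_into_num_files (dic : List (String × String)) (num_files : Int) (out : List (List (String × String))) : Prop := out = split_dictionary_into_num_files_alt dic num_files
instance (dic : List (String × String)) (num_files : Int) (out : List (List (String × String))) : Decidable (Spec_split_dictionary_into_num_files dic num_files out) := by unfold Spec_split_dictionary_into_num_files; infer_instance

-- ===== CLAIM (what is proved, stated in full; the proofs are below) =====
def Claim_equal_split_dictionary_into_num_files : Prop := ∀ (dic : List (String × String)) (num_files : Int), Dom_split_dictionary_into_num_files dic num_files → Pre_split_dictionary_into_num_files dic num_files → Spec_split_dictionary_into_num_files dic num_files (split_dictionary_into_num_files dic num_files)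

-- ===== LEMMAS AND PROOFS =====

-- folding dict-insert over a list of pairs (dict(pairs) starting from d)
def pvInsFold (d : PySem.Dict String String) (l : List (String × String)) : PySem.Dict String String :=
  l.foldl (fun d p => d.insert p.1 p.2) d

lemma pvOfList_eq_insFold (l : List (String × String)) :
    PySem.Dict.ofList l = pvInsFold PySem.Dict.empty l := rfl

-- _consume takes exactly the k.toNat-prefix and leaves the corresponding drop.
lemma pvConsume_eq (l : List (String × String)) :
    ∀ (k : Int) (d : PySem.Dict String String),
      pvConsume k l d = (pvInsFold d (l.take k.toNat), l.drop k.toNat) := by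
  induction l with
  | nil => intro k d; simp [pvConsume, pvInsFold]
  | cons p rest ih =>
    intro k d
    by_cases hk : k ≤ 0
    · have : k.toNat = 0 := by omega
      simp [pvConsume, hk, this, pvInsFold]
    · have ht : k.toNat = (k - 1).toNat + 1 := by omega
      rw [pvConsume, if_neg hk, ih (k - 1), ht]
      simp [pvInsFold]

-- Invariant of A's loop: starting at index k, the items going to the three dicts are
-- the prefix up to (B1-k), the middle up to (B2-k), and the rest.
lemma pvLoop_eq (size remainder : Int) (l : List (String × String)) :
    ∀ (k : Int) (d1 d2 d3 : PySem.Dict String String),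
    (PySem.List.enumerate l k).foldl (pvStepA size remainder) (d1, d2, d3) =
      (pvInsFold d1 (l.take ((size + (if remainder > 0 then 1 else 0)) - k).toNat),
       pvInsFold d2 ((l.drop ((size + (if remainder > 0 then 1 else 0)) - k).toNat).take
         (max ((2 * size + (if remainder > 1 then 1 else 0)) - k).toNat ((size + (if remainder > 0 then 1 else 0)) - k).toNat
           - ((size + (if remainder > 0 then 1 else 0)) - k).toNat)),
       pvInsFold d3 (l.drop (max ((2 * size + (if remainder > 1 then 1 else 0)) - k).toNat ((size + (if remainder > 0 then 1 else 0)) - k).toNat))) := by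
  set B1 := size + (if remainder > (0:Int) then (1:Int) else 0) with hB1
  set B2 := 2 * size + (if remainder > (1:Int) then (1:Int) else 0) with hB2
  induction l with
  | nil => intro k d1 d2 d3; simp [PySem.List.enumerate, pvInsFold]
  | cons x xs ih =>
    intro k d1 d2 d3
    rw [PySem.List.enumerate_cons, List.foldl_cons]
    by_cases h1 : k < B1
    · have hstep : pvStepA size remainder (d1, d2, d3) (k, x)
          = (d1.insert x.1 x.2, d2, d3) := by
        simp [pvStepA, ← hB1, h1]
      have hu2 : max (B2 - k).toNat (B1 - k).toNat
          = max (B2 - (k + 1)).toNat (B1 - (k + 1)).toNat + 1 := by omega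
      have hu1 : (B1 - k).toNat = (B1 - (k + 1)).toNat + 1 := by omega
      rw [hstep, ih (k + 1), hu2, hu1]
      simp [pvInsFold, Nat.succ_sub_succ]
    · by_cases h2 : k < B2
      · have hstep : pvStepA size remainder (d1, d2, d3) (k, x)
            = (d1, d2.insert x.1 x.2, d3) := by
          simp [pvStepA, ← hB1, ← hB2, h1, h2]
        have hu2 : max (B2 - k).toNat (B1 - k).toNat
            = max (B2 - (k + 1)).toNat (B1 - (k + 1)).toNat + 1 := by omega
        have hu1 : (B1 - k).toNat = 0 := by omega
        have hu1' : (B1 - (k + 1)).toNat = 0 := by omega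
        rw [hstep, ih (k + 1), hu2, hu1, hu1']
        simp [pvInsFold]
      · have hstep : pvStepA size remainder (d1, d2, d3) (k, x)
            = (d1, d2, d3.insert x.1 x.2) := by
          simp [pvStepA, ← hB1, ← hB2, h1, h2]
        have hu2 : max (B2 - k).toNat (B1 - k).toNat = 0 := by omega
        have hu2' : max (B2 - (k + 1)).toNat (B1 - (k + 1)).toNat = 0 := by omega
        have hu1 : (B1 - k).toNat = 0 := by omega
        have hu1' : (B1 - (k + 1)).toNat = 0 := by omega
        rw [hstep, ih (k + 1), hu2, hu2', hu1, hu1']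
        simp [pvInsFold]

-- ===== VERDICT (by name: the statement is the Claim_ definition above) =====
theorem split_dictionary_into_num_files_spec : Claim_equal_split_dictionary_into_num_files := by
  intro dic num_files _ _
  unfold Spec_split_dictionary_into_num_files
  unfold split_dictionary_into_num_files split_dictionary_into_num_files_alt
  simp only []
  set size := PySem.Int.floordiv (dic.length : Int) num_files with hsize
  set remainder := PySem.Int.mod (dic.length : Int) num_files with hrem
  set B1 := size + (if remainder > (0:Int) then (1:Int) else 0) with hB1
  set B2 := 2 * size + (if remainder > (1:Int) then (1:Int) else 0) with hB2
  rw [pvLoop_eq size remainder dic 0, pvConsume_eq dic B1,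
      pvConsume_eq (dic.drop B1.toNat) (B2 - B1)]
  simp only [sub_zero]
  rw [← hB1, ← hB2]
  have hdelta : (if remainder > (1:Int) then (1:Int) else 0) ≤ (if remainder > (0:Int) then (1:Int) else 0) := by
    split_ifs with ha hb <;> omega
  have hd0 : (0:Int) ≤ (if remainder > (0:Int) then (1:Int) else 0) := by split_ifs <;> omega
  have hd1 : (0:Int) ≤ (if remainder > (1:Int) then (1:Int) else 0) := by split_ifs <;> omega
  have hmid : (B2 - B1).toNat = max B2.toNat B1.toNat - B1.toNat := by omega
  have htail : (dic.drop B1.toNat).drop (B2 - B1).toNat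
      = dic.drop (max B2.toNat B1.toNat) := by
    rw [List.drop_drop]
    congr 1
    omega
  rw [htail, hmid, pvOfList_eq_insFold]
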